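-- pv_equiv track=rewrite | github.com/PhyloSofS-Team/thoraxe | thoraxe/thoraxe.py | _merge_clusters_in_list
-- ===== SOURCE A (Python) =====
-- def _merge_clusters_in_list(cluster_lists):
--     """Return a list of sets, each set has the clusters to merge."""
--     output_list = []
--     for input_list in cluster_lists:
--         input_set = set(input_list)
--         added = False
--         for output_set in output_list:
--             if output_set.intersection(input_set):
--                 output_set.update(input_set)
--                 added = True
--         if not added:
--             output_list.append(input_set)
--     return output_list
-- ===== SOURCE B (Python) =====
-- def _merge_clusters_in_list(cluster_lists):
--     """Return a list of sets, each set has the clusters to merge."""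
--     output_list = []
--     elem_to_idxs = {}  # element -> set of indices of output sets containing it
--     for input_list in cluster_lists:
--         input_set = set(input_list)
--         idxs = sorted({i for e in input_set for i in elem_to_idxs.get(e, ())})
--         if idxs:
--             for i in idxs:
--                 output_list[i] |= input_set
--             for e in input_set:
--                 elem_to_idxs.setdefault(e, set()).update(idxs)
--         else:
--             new_idx = len(output_list)
--             output_list.append(input_set)
--             for e in input_set:
--                 elem_to_idxs.setdefault(e, set()).add(new_idx)
--     return output_list
-- ===== Notes on version B (the rewrite author's own statement) =====
-- stated objective: alternative
-- what changed: Replaces A's scan of every existing output set (computing a set intersection with each) by an element-to-set-indices map that locates the intersecting output sets directly and is updated incrementally.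
import Mathlib
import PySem

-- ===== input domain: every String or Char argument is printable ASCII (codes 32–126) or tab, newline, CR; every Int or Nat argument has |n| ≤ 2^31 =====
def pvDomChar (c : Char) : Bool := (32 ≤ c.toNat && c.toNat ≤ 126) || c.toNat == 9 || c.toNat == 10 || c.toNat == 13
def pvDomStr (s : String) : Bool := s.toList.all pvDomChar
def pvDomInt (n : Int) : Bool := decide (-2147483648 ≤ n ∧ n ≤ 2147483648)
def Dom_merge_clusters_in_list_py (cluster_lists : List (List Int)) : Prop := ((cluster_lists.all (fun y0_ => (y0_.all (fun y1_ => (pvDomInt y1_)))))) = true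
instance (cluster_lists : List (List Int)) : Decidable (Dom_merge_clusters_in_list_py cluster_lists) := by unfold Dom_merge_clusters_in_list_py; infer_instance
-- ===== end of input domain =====

-- B replaces A's scan of every output set (with a set intersection each) by an
-- element→set-indices map, kept incrementally, that locates the intersecting output sets
-- directly; objective: alternative (a different algorithm of similar measured cost).
-- Inner Python sets are modelled as PySem.Set (insertion-ordered distinct elements).

-- ===== PORT A =====
-- one iteration of A's outer loop: scan output_list, update every intersecting set in place,
-- append input_set if none intersected
def mergeStepA (output_list : List (List Int)) (input_list : List Int) : List (List Int) :=
  let input_set : PySem.Set Int := PySem.Set.ofList input_list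
  let r := output_list.foldl
    (fun (p : List (List Int) × Bool) output_set =>
      if PySem.Set.inter output_set input_set ≠ [] then
        (p.1 ++ [PySem.Set.update output_set input_set], true)
      else
        (p.1 ++ [output_set], p.2))
    ([], false)
  if ¬ r.2 then r.1 ++ [input_set] else r.1

def merge_clusters_in_list_py (cluster_lists : List (List Int)) : List (List Int) :=
  cluster_lists.foldl mergeStepA []

-- ===== PORT B =====
-- one iteration of B's loop; state = (output_list, elem_to_idxs)
def mergeStepB (st : List (List Int) × PySem.Dict Int (List Nat)) (input_list : List Int) :
    List (List Int) × PySem.Dict Int (List Nat) :=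
  let output_list := st.1
  let elem_to_idxs := st.2
  let input_set : PySem.Set Int := PySem.Set.ofList input_list
  let idxSet : PySem.Set Nat :=
    input_set.foldl (fun acc e => PySem.Set.update acc (elem_to_idxs.getD e [])) []
  let idxs := PySem.List.sorted idxSet (fun i => i) false
  if idxs ≠ [] then
    (idxs.foldl (fun ol i => ol.set i (PySem.Set.update (ol.getD i []) input_set)) output_list,
     input_set.foldl (fun m e => m.insert e (PySem.Set.update (m.getD e []) idxs)) elem_to_idxs)
  else
    let new_idx := output_list.length
    (output_list ++ [input_set],
     input_set.foldl (fun m e => m.insert e (PySem.Set.add (m.getD e []) new_idx)) elem_to_idxs)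

def merge_clusters_in_list_py_alt (cluster_lists : List (List Int)) : List (List Int) :=
  (cluster_lists.foldl mergeStepB ([], PySem.Dict.empty)).1

-- ===== PRECONDITION & SPEC =====
def Spec_merge_clusters_in_list_py (cluster_lists : List (List Int)) (out : List (List Int)) : Prop := out = merge_clusters_in_list_py_alt cluster_lists
instance (cluster_lists : List (List Int)) (out : List (List Int)) : Decidable (Spec_merge_clusters_in_list_py cluster_lists out) := by unfold Spec_merge_clusters_in_list_py; infer_instance

-- ===== CLAIM (what is proved, stated in full; the proofs are below) =====
def Claim_equal_merge_clusters_in_list_py : Prop := ∀ (cluster_lists : List (List Int)), Dom_merge_clusters_in_list_py cluster_lists → Spec_merge_clusters_in_list_py cluster_lists (merge_clusters_in_list_py cluster_lists)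

-- ===== LEMMAS AND PROOFS =====

-- the invariant tying B's index map to the current output list
def MapInv (out : List (List Int)) (m : PySem.Dict Int (List Nat)) : Prop :=
  ∀ (e : Int) (i : Nat), i ∈ m.getD e [] ↔ (i < out.length ∧ e ∈ out.getD i [])

theorem mem_foldl_update {α β : Type} [BEq β] [LawfulBEq β] (l : List α) (g : α → List β)
    (acc : PySem.Set β) (y : β) :
    y ∈ l.foldl (fun acc e => PySem.Set.update acc (g e)) acc ↔ y ∈ acc ∨ ∃ e ∈ l, y ∈ g e := by
  induction l generalizing acc with
  | nil => simp
  | cons a l ih => simp [ih, PySem.Set.mem_update]; tauto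

theorem nodup_foldl_update {α β : Type} [BEq β] [LawfulBEq β] (l : List α) (g : α → List β)
    (acc : PySem.Set β) (h : acc.Nodup) :
    (l.foldl (fun acc e => PySem.Set.update acc (g e)) acc).Nodup := by
  induction l generalizing acc with
  | nil => exact h
  | cons a l ih => exact ih _ (PySem.Set.nodup_update _ _ h)

-- A's inner loop, characterised
theorem foldA_char (out : List (List Int)) (s : PySem.Set Int)
    (acc : List (List Int)) (b : Bool) :
    out.foldl
      (fun (p : List (List Int) × Bool) output_set =>
        if PySem.Set.inter output_set s ≠ [] then
          (p.1 ++ [PySem.Set.update output_set s], true)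
        else
          (p.1 ++ [output_set], p.2)) (acc, b)
    = (acc ++ out.map (fun os => if PySem.Set.inter os s ≠ [] then PySem.Set.update os s else os),
       b || out.any (fun os => PySem.Set.inter os s ≠ [])) := by
  induction out generalizing acc b with
  | nil => simp
  | cons os out ih =>
    simp only [List.foldl_cons, List.map_cons, List.any_cons]
    by_cases h : PySem.Set.inter os s ≠ []
    · rw [if_pos h, ih]; simp [h]
    · rw [if_neg h, ih]; simp [h]

theorem inter_ne_nil_iff (os s : List Int) :
    PySem.Set.inter os s ≠ [] ↔ ∃ e ∈ s, e ∈ os := by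
  rw [← List.isEmpty_eq_false_iff, List.isEmpty_eq_false_iff_exists_mem]
  constructor
  · rintro ⟨x, hx⟩
    rw [PySem.Set.mem_inter _ _ _] at hx
    exact ⟨x, hx.2, hx.1⟩
  · rintro ⟨e, hs, ho⟩
    exact ⟨e, (PySem.Set.mem_inter _ _ _).2 ⟨ho, hs⟩⟩

-- B's index-update loop, characterised pointwise
theorem foldl_set_getD (idxs : List Nat) (out : List (List Int)) (s : List Int)
    (hnd : idxs.Nodup) (hlt : ∀ i ∈ idxs, i < out.length) (j : Nat) :
    (idxs.foldl (fun ol i => ol.set i (PySem.Set.update (ol.getD i []) s)) out).getD j []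
      = if j ∈ idxs then PySem.Set.update (out.getD j []) s else out.getD j [] := by
  induction idxs generalizing out with
  | nil => simp
  | cons i idxs ih =>
    have hi : i < out.length := hlt i (by simp)
    have hrec := ih (out.set i (PySem.Set.update (out.getD i []) s)) hnd.of_cons
      (fun k hk => by simpa using hlt k (by simp [hk]))
    simp only [List.foldl_cons, hrec]
    by_cases hj : j ∈ idxs
    · have hji : j ≠ i := fun h => (List.nodup_cons.1 hnd).1 (h ▸ hj)
      simp [hj, List.getD_eq_getElem?_getD, List.getElem?_set_ne (Ne.symm hji)]
    · by_cases hji : j = i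
      · subst hji
        simp [hj, List.getD_eq_getElem?_getD, List.getElem?_set_self, hi,
          List.getElem?_eq_getElem hi]
      · simp [hj, hji, List.getD_eq_getElem?_getD, List.getElem?_set_ne (Ne.symm hji)]

theorem foldl_set_length (idxs : List Nat) (out : List (List Int)) (s : List Int) :
    (idxs.foldl (fun ol i => ol.set i (PySem.Set.update (ol.getD i []) s)) out).length
      = out.length := by
  induction idxs generalizing out with
  | nil => rfl
  | cons i idxs ih =>
    simp only [List.foldl_cons]
    rw [ih]
    simp

-- B's dict-update loop, characterised pointwise
theorem dict_foldl_getD (s : List Int) (hnd : s.Nodup) (m : PySem.Dict Int (List Nat))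
    (f : List Nat → List Nat) (x : Int) :
    (s.foldl (fun m e => m.insert e (f (m.getD e []))) m).getD x []
      = if x ∈ s then f (m.getD x []) else m.getD x [] := by
  induction s generalizing m with
  | nil => simp
  | cons a s ih =>
    simp only [List.foldl_cons, ih (List.nodup_cons.1 hnd).2]
    by_cases hx : x ∈ s
    · have hxa : x ≠ a := fun h => (List.nodup_cons.1 hnd).1 (h ▸ hx)
      simp [hx, PySem.Dict.getD_insert, hxa]
    · by_cases hxa : x = a
      · subst hxa; simp [hx, PySem.Dict.getD_insert]
      · simp [hx, hxa, PySem.Dict.getD_insert]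

-- one step: A's step equals B's step and the invariant is preserved
theorem step_eq_and_inv (out : List (List Int)) (m : PySem.Dict Int (List Nat)) (l : List Int)
    (hinv : MapInv out m) :
    mergeStepA out l = (mergeStepB (out, m) l).1 ∧
      MapInv (mergeStepB (out, m) l).1 (mergeStepB (out, m) l).2 := by
  set s : PySem.Set Int := PySem.Set.ofList l with hs
  have hsnd : s.Nodup := PySem.Set.nodup_ofList l
  set idxSet : PySem.Set Nat :=
    s.foldl (fun acc e => PySem.Set.update acc (m.getD e [])) [] with hidxSet
  set idxs := PySem.List.sorted idxSet (fun i => i) false with hidxs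
  -- membership in idxs
  have hmem : ∀ i : Nat, i ∈ idxs ↔ (i < out.length ∧ ∃ e ∈ s, e ∈ out.getD i []) := by
    intro i
    rw [hidxs, PySem.List.mem_sorted, hidxSet, mem_foldl_update]
    simp only [List.not_mem_nil, false_or]
    constructor
    · rintro ⟨e, he, hi⟩
      rcases (hinv e i).1 hi with ⟨h1, h2⟩
      exact ⟨h1, e, he, h2⟩
    · rintro ⟨h1, e, he, h2⟩
      exact ⟨e, he, (hinv e i).2 ⟨h1, h2⟩⟩
  have hlt : ∀ i ∈ idxs, i < out.length := fun i hi => ((hmem i).1 hi).1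
  have hndidx : idxs.Nodup := by
    refine ((PySem.List.sorted_perm idxSet (fun i => i) false).nodup_iff).2 ?_
    rw [hidxSet]
    exact nodup_foldl_update s (fun e => m.getD e []) [] List.nodup_nil
  -- A's step in closed form
  have hA : mergeStepA out l =
      (if (out.any fun os => decide (PySem.Set.inter os s ≠ [])) = true then
        out.map (fun os => if PySem.Set.inter os s ≠ [] then PySem.Set.update os s else os)
      else out ++ [s]) := by
    unfold mergeStepA
    simp only [foldA_char, ← hs, Bool.false_or, List.nil_append]
    by_cases h : (out.any fun os => decide (PySem.Set.inter os s ≠ [])) = true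
    · rw [if_neg (not_not_intro h), if_pos h]
    · have hno : ∀ os ∈ out, ¬ PySem.Set.inter os s ≠ [] := by
        intro os hos hne
        exact h (List.any_eq_true.2 ⟨os, hos, by simpa using hne⟩)
      have hmapid : out.map (fun os => if PySem.Set.inter os s ≠ [] then PySem.Set.update os s else os) = out := by
        rw [List.map_congr_left (fun os hos => if_neg (hno os hos))]
        exact List.map_id _
      rw [if_pos h, if_neg h, hmapid]
  -- the intersection test at index i matches membership in idxs
  have hiter : ∀ i : Nat, i < out.length →
      ((PySem.Set.inter (out.getD i []) s ≠ []) ↔ i ∈ idxs) := by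
    intro i hi
    rw [inter_ne_nil_iff, hmem]
    exact ⟨fun h => ⟨hi, h⟩, fun h => h.2⟩
  -- any-intersection ↔ idxs nonempty
  have hany : out.any (fun os => PySem.Set.inter os s ≠ []) ↔ idxs ≠ [] := by
    rw [List.any_eq_true, ← List.isEmpty_eq_false_iff, List.isEmpty_eq_false_iff_exists_mem]
    constructor
    · rintro ⟨os, hos, h⟩
      simp only [decide_eq_true_eq] at h
      rcases List.mem_iff_getElem.1 hos with ⟨i, hil, rfl⟩
      exact ⟨i, (hiter i hil).1 (by simpa [List.getD_eq_getElem?_getD, List.getElem?_eq_getElem hil] using h)⟩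
    · rintro ⟨i, hi⟩
      have hil := hlt i hi
      refine ⟨out.getD i [], ?_, by simpa using (hiter i hil).2 hi⟩
      simp [List.getD_eq_getElem?_getD, List.getElem?_eq_getElem hil]
  by_cases hcase : idxs ≠ []
  · -- merging case
    have hanyt : out.any (fun os => PySem.Set.inter os s ≠ []) = true := by
      simpa using hany.2 hcase
    have hBout : (mergeStepB (out, m) l).1 =
        idxs.foldl (fun ol i => ol.set i (PySem.Set.update (ol.getD i []) s)) out := by
      simp only [mergeStepB, ← hs, ← hidxSet, ← hidxs]
      rw [if_pos hcase]
    have hBm : (mergeStepB (out, m) l).2 =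
        s.foldl (fun m e => m.insert e (PySem.Set.update (m.getD e []) idxs)) m := by
      simp only [mergeStepB, ← hs, ← hidxSet, ← hidxs]
      rw [if_pos hcase]
    have hlen : (mergeStepB (out, m) l).1.length = out.length := by
      rw [hBout]; exact foldl_set_length _ _ _
    have hgetD : ∀ j : Nat, (mergeStepB (out, m) l).1.getD j []
        = if j ∈ idxs then PySem.Set.update (out.getD j []) s else out.getD j [] := by
      intro j; rw [hBout]; exact foldl_set_getD idxs out s hndidx hlt j
    constructor
    · rw [hA, if_pos hanyt]
      apply List.ext_getElem (by simp [hlen])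
      intro j hj1 hj2
      have hjo : j < out.length := by simpa using hj1
      have h1 : (mergeStepB (out, m) l).1[j] = (mergeStepB (out, m) l).1.getD j [] := by
        simp [List.getD_eq_getElem?_getD, List.getElem?_eq_getElem hj2]
      have h2 : (out.map (fun os => if PySem.Set.inter os s ≠ [] then PySem.Set.update os s else os))[j]
          = if PySem.Set.inter (out.getD j []) s ≠ [] then PySem.Set.update (out.getD j []) s else out.getD j [] := by
        simp [List.getD_eq_getElem?_getD, List.getElem?_eq_getElem hjo]
      rw [h2, h1, hgetD j]
      by_cases hj : j ∈ idxs
      · rw [if_pos hj, if_pos ((hiter j hjo).2 hj)]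
      · rw [if_neg hj, if_neg (fun h => hj ((hiter j hjo).1 h))]
    · intro e i
      rw [hBm, dict_foldl_getD s hsnd m (fun v => PySem.Set.update v idxs) e, hgetD i, hlen]
      by_cases he : e ∈ s
      · rw [if_pos he, PySem.Set.mem_update]
        constructor
        · rintro (hi | hi)
          · rcases (hinv e i).1 hi with ⟨h1, h2⟩
            refine ⟨h1, ?_⟩
            by_cases hid : i ∈ idxs
            · simp [hid, PySem.Set.mem_update, h2, ← List.getD_eq_getElem?_getD]
            · simp [hid, h2, ← List.getD_eq_getElem?_getD]
          · exact ⟨hlt i hi, by simp [hi, PySem.Set.mem_update, he, ← List.getD_eq_getElem?_getD]⟩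
        · rintro ⟨h1, h2⟩
          by_cases hid : i ∈ idxs
          · exact Or.inr hid
          · rw [if_neg hid] at h2
            exact Or.inl ((hinv e i).2 ⟨h1, h2⟩)
      · rw [if_neg he]
        rw [hinv e i]
        constructor
        · rintro ⟨h1, h2⟩
          refine ⟨h1, ?_⟩
          by_cases hid : i ∈ idxs
          · simp [hid, PySem.Set.mem_update, h2, ← List.getD_eq_getElem?_getD]
          · simp [hid, h2, ← List.getD_eq_getElem?_getD]
        · rintro ⟨h1, h2⟩
          refine ⟨h1, ?_⟩
          by_cases hid : i ∈ idxs
          · rw [if_pos hid, PySem.Set.mem_update] at h2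
            rcases h2 with h2 | h2
            · exact h2
            · exact absurd h2 he
          · rwa [if_neg hid] at h2
  · -- appending case
    rw [not_not] at hcase
    have hanyf : out.any (fun os => PySem.Set.inter os s ≠ []) = false := by
      by_contra h
      exact (hany.1 (by simpa using h)) (by simp [hcase])
    have hBout : (mergeStepB (out, m) l).1 = out ++ [s] := by
      simp only [mergeStepB, ← hs, ← hidxSet, ← hidxs, hcase]
      simp
    have hBm : (mergeStepB (out, m) l).2 =
        s.foldl (fun m e => m.insert e (PySem.Set.add (m.getD e []) out.length)) m := by
      simp only [mergeStepB, ← hs, ← hidxSet, ← hidxs, hcase]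
      simp
    constructor
    · rw [hA, hanyf, hBout]; simp
    · intro e i
      rw [hBm, dict_foldl_getD s hsnd m (fun v => PySem.Set.add v out.length) e, hBout]
      have hgd : ∀ i : Nat, (out ++ [s]).getD i [] =
          if i < out.length then out.getD i [] else if i = out.length then s else [] := by
        intro i
        by_cases h1 : i < out.length
        · simp [h1, List.getD_eq_getElem?_getD, List.getElem?_append_left h1]
        · by_cases h2 : i = out.length
          · subst h2; simp [h1, List.getD_eq_getElem?_getD, List.getElem?_append_right (le_refl _)]
          · have : (out ++ [s]).length ≤ i := by
              simp only [List.length_append, List.length_cons, List.length_nil]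
              omega
            simp [h1, h2, List.getD_eq_getElem?_getD, List.getElem?_eq_none this]
      by_cases he : e ∈ s
      · rw [if_pos he, PySem.Set.mem_add, hinv e i, hgd i]
        simp only [List.length_append, List.length_cons, List.length_nil]
        constructor
        · rintro (⟨h1, h2⟩ | h1)
          · exact ⟨by omega, by simp [h1, h2, ← List.getD_eq_getElem?_getD]⟩
          · exact ⟨by omega, by simp [h1, Nat.lt_irrefl, he, ← List.getD_eq_getElem?_getD]⟩
        · rintro ⟨h1, h2⟩
          by_cases hil : i < out.length
          · rw [if_pos hil] at h2; exact Or.inl ⟨hil, h2⟩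
          · exact Or.inr (by omega)
      · rw [if_neg he, hinv e i, hgd i]
        simp only [List.length_append, List.length_cons, List.length_nil]
        constructor
        · rintro ⟨h1, h2⟩
          exact ⟨by omega, by simp [h1, h2, ← List.getD_eq_getElem?_getD]⟩
        · rintro ⟨h1, h2⟩
          by_cases hil : i < out.length
          · rw [if_pos hil] at h2; exact ⟨hil, h2⟩
          · by_cases hie : i = out.length
            · rw [if_neg hil, if_pos hie] at h2; exact absurd h2 he
            · rw [if_neg hil, if_neg hie] at h2; exact absurd h2 (List.not_mem_nil)

theorem fold_eq (cls : List (List Int)) (out : List (List Int)) (m : PySem.Dict Int (List Nat))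
    (hinv : MapInv out m) :
    cls.foldl mergeStepA out = (cls.foldl mergeStepB (out, m)).1 := by
  induction cls generalizing out m with
  | nil => rfl
  | cons l cls ih =>
    rcases step_eq_and_inv out m l hinv with ⟨heq, hinv'⟩
    simp only [List.foldl_cons, heq]
    exact ih _ _ hinv'

-- ===== VERDICT (by name: the statement is the Claim_ definition above) =====
theorem merge_clusters_in_list_py_spec : Claim_equal_merge_clusters_in_list_py := by
  intro cls _
  show merge_clusters_in_list_py cls = merge_clusters_in_list_py_alt cls
  unfold merge_clusters_in_list_py merge_clusters_in_list_py_alt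
  exact fold_eq cls [] PySem.Dict.empty (by intro e i; simp [PySem.Dict.getD_empty])
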